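-- pv_equiv track=rewrite | github.com/lilly1987/ComfyU-auto-script-data-cleaning | scripts/split_positive_tags_char.py | build_dress_field
-- ===== SOURCE A (Python) =====
-- from typing import Any, Dict, List, Optional, Tuple
--
-- def split_top_level(text: str, separator: str) -> List[str]:
--     parts: List[str] = []
--     current: List[str] = []
--     depth = 0
--
--     for ch in text:
--         if ch == "{":
--             depth += 1
--         elif ch == "}":
--             depth = max(0, depth - 1)
--
--         if ch == separator and depth == 0:
--             parts.append("".join(current))
--             current = []
--             continue
--
--         current.append(ch)
--
--     parts.append("".join(current))
--     return parts
--
-- def build_dress_field(structure: str, suffix: str) -> str: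
--     if structure:
--         group_count = len([part for part in split_top_level(structure, "|") if part.strip()])
--         if group_count > 1:
--             rendered_structure = f"{{{structure}}}"
--         else:
--             rendered_structure = structure
--         return f"{{  {rendered_structure}  |{suffix}}},"
--     return f"{{   |{suffix}}},"
-- ===== SOURCE B (Python) =====
-- def build_dress_field(structure: str, suffix: str) -> str:
--     if not structure:
--         return f"{{   |{suffix}}},"
--     depth = 0
--     seen = False   # current top-level group contains a non-whitespace char
--     count = 0      # non-empty top-level groups closed so far
--     for ch in structure:
--         if ch == "{":
--             depth += 1
--             seen = True
--         elif ch == "}":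
--             depth = max(0, depth - 1)
--             seen = True
--         elif ch == "|" and depth == 0:
--             if seen:
--                 count += 1
--             seen = False
--         elif not ch.isspace():
--             seen = True
--     if seen:
--         count += 1
--     rendered = f"{{{structure}}}" if count > 1 else structure
--     return f"{{  {rendered}  |{suffix}}},"
-- ===== Notes on version B (the rewrite author's own statement) =====
-- stated objective: alternative
-- what changed: Replaces split_top_level's list-of-substrings construction plus strip-filter-count with a single character scan that maintains depth, a seen-non-whitespace flag and a running count of non-empty top-level groups.
import Mathlib
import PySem

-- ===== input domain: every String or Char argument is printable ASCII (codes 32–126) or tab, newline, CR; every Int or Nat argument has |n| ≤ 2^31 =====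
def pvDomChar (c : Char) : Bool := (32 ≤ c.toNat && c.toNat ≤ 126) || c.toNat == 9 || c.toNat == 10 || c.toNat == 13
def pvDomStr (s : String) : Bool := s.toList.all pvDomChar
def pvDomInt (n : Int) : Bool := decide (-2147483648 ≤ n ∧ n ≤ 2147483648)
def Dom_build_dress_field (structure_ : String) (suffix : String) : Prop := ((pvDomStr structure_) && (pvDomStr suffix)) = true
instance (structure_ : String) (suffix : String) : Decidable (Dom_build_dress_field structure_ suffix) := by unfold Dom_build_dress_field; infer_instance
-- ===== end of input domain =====

-- B replaces A's "split into top-level substrings, then count the strip-nonempty ones" by a single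
-- character scan maintaining (depth, seen-non-whitespace flag, count); same output everywhere (objective: alternative).

-- ===== PORT A =====
-- split_top_level: loop body over one character, state (parts, current, depth)
def splitTopStep (separator : Char) (st : List (List Char) × List Char × Int) (ch : Char) :
    List (List Char) × List Char × Int :=
  let parts := st.1
  let current := st.2.1
  let depth := st.2.2
  let depth := if ch == '{' then depth + 1
               else if ch == '}' then max 0 (depth - 1)
               else depth
  if ch == separator && depth == 0 then (parts ++ [current], [], depth)
  else (parts, current ++ [ch], depth)

def split_top_level (text : List Char) (separator : Char) : List (List Char) :=
  let st := text.foldl (splitTopStep separator) ([], [], 0)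
  st.1 ++ [st.2.1]

def build_dress_field (structure_ : String) (suffix : String) : String :=
  if structure_.toList ≠ [] then
    let group_count :=
      ((split_top_level structure_.toList '|').filter
        (fun part => !(PySem.Chars.strip part).isEmpty)).length
    let rendered_structure :=
      if group_count > 1 then '{' :: structure_.toList ++ ['}'] else structure_.toList
    String.ofList ('{' :: ' ' :: ' ' :: rendered_structure ++ ' ' :: ' ' :: '|' :: suffix.toList ++ ['}', ','])
  else
    String.ofList ('{' :: ' ' :: ' ' :: ' ' :: '|' :: suffix.toList ++ ['}', ','])

-- ===== PORT B =====
-- one-pass scan: state (depth, seen, count)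
def scanStep (st : Int × Bool × Nat) (ch : Char) : Int × Bool × Nat :=
  let depth := st.1
  let seen := st.2.1
  let count := st.2.2
  if ch == '{' then (depth + 1, true, count)
  else if ch == '}' then (max 0 (depth - 1), true, count)
  else if ch == '|' && depth == 0 then (depth, false, if seen then count + 1 else count)
  else if !(PySem.Chars.isspace ch) then (depth, true, count)
  else (depth, seen, count)

def build_dress_field_alt (structure_ : String) (suffix : String) : String :=
  if structure_.toList = [] then
    String.ofList ('{' :: ' ' :: ' ' :: ' ' :: '|' :: suffix.toList ++ ['}', ','])
  else
    let st := structure_.toList.foldl scanStep (0, false, 0)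
    let count := if st.2.1 then st.2.2 + 1 else st.2.2
    let rendered :=
      if count > 1 then '{' :: structure_.toList ++ ['}'] else structure_.toList
    String.ofList ('{' :: ' ' :: ' ' :: rendered ++ ' ' :: ' ' :: '|' :: suffix.toList ++ ['}', ','])

-- ===== PRECONDITION & SPEC =====
def Spec_build_dress_field (structure_ : String) (suffix : String) (out : String) : Prop := out = build_dress_field_alt structure_ suffix
instance (structure_ : String) (suffix : String) (out : String) : Decidable (Spec_build_dress_field structure_ suffix out) := by unfold Spec_build_dress_field; infer_instance

-- ===== CLAIM (what is proved, stated in full; the proofs are below) =====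
def Claim_equal_build_dress_field : Prop := ∀ (structure_ : String) (suffix : String), Dom_build_dress_field structure_ suffix → Spec_build_dress_field structure_ suffix (build_dress_field structure_ suffix)

-- ===== LEMMAS AND PROOFS =====

-- "current group has a non-whitespace character"
def hasInk (cs : List Char) : Bool := cs.any (fun c => !PySem.Chars.isspace c)

-- number of strip-nonempty parts
def inkCount (parts : List (List Char)) : Nat :=
  (parts.filter (fun p => !(PySem.Chars.strip p).isEmpty)).length

theorem strip_eq_nil_iff (cs : List Char) :
    PySem.Chars.strip cs = [] ↔ ∀ c ∈ cs, PySem.Chars.isspace c = true := by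
  simp only [PySem.Chars.strip, PySem.Chars.rstrip, PySem.Chars.lstrip,
    List.reverse_eq_nil_iff, List.dropWhile_eq_nil_iff, List.mem_reverse]
  constructor
  · intro h c hc
    by_cases hsp : PySem.Chars.isspace c = true
    · exact hsp
    · have hsplit := List.takeWhile_append_dropWhile (p := PySem.Chars.isspace) (l := cs)
      rcases List.mem_append.mp (by rw [hsplit]; exact hc) with h1 | h1
      · exact List.mem_takeWhile_imp h1
      · exact h c h1
  · intro h c hc
    exact h c ((List.dropWhile_sublist _).subset hc)

theorem strip_isEmpty (cs : List Char) : (PySem.Chars.strip cs).isEmpty = !hasInk cs := by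
  cases h : hasInk cs with
  | false =>
    have hall : ∀ c ∈ cs, PySem.Chars.isspace c = true := by
      simpa [hasInk, List.any_eq_false] using h
    simp [(strip_eq_nil_iff cs).mpr hall]
  | true =>
    have hne : PySem.Chars.strip cs ≠ [] := by
      rw [Ne, strip_eq_nil_iff]
      intro hall
      obtain ⟨c, hc, hcs⟩ :=
        (by simpa [hasInk] using h : ∃ x ∈ cs, PySem.Chars.isspace x = false)
      exact absurd (hall c hc) (by simp [hcs])
    simp [hne]

theorem hasInk_append_singleton (cs : List Char) (ch : Char) :
    hasInk (cs ++ [ch]) = (hasInk cs || !PySem.Chars.isspace ch) := by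
  simp [hasInk, List.any_append]

theorem inkCount_append_singleton (parts : List (List Char)) (p : List Char) :
    inkCount (parts ++ [p]) = inkCount parts + (if hasInk p then 1 else 0) := by
  simp only [inkCount, List.filter_append, List.length_append, strip_isEmpty]
  cases h : hasInk p <;> simp [h]

theorem scan_invariant (cs : List Char) :
    ∀ (parts : List (List Char)) (current : List Char) (depth : Int),
    cs.foldl scanStep (depth, hasInk current, inkCount parts) =
      ((cs.foldl (splitTopStep '|') (parts, current, depth)).2.2,
       hasInk (cs.foldl (splitTopStep '|') (parts, current, depth)).2.1,
       inkCount (cs.foldl (splitTopStep '|') (parts, current, depth)).1) := by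
  induction cs with
  | nil => intro parts current depth; rfl
  | cons ch cs ih =>
    intro parts current depth
    simp only [List.foldl_cons]
    by_cases h1 : ch = '{'
    · subst h1
      have hA : splitTopStep '|' (parts, current, depth) '{' = (parts, current ++ ['{'], depth + 1) := by
        simp [splitTopStep]
      have hB : scanStep (depth, hasInk current, inkCount parts) '{' = (depth + 1, true, inkCount parts) := by
        simp [scanStep]
      rw [hA, hB]
      have := ih parts (current ++ ['{']) (depth + 1)
      rw [hasInk_append_singleton, (by decide : PySem.Chars.isspace '{' = false)] at this
      simpa using this
    · by_cases h2 : ch = '}'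
      · subst h2
        have hA : splitTopStep '|' (parts, current, depth) '}' =
            (parts, current ++ ['}'], max 0 (depth - 1)) := by simp [splitTopStep]
        have hB : scanStep (depth, hasInk current, inkCount parts) '}' =
            (max 0 (depth - 1), true, inkCount parts) := by simp [scanStep]
        rw [hA, hB]
        have := ih parts (current ++ ['}']) (max 0 (depth - 1))
        rw [hasInk_append_singleton, (by decide : PySem.Chars.isspace '}' = false)] at this
        simpa using this
      · by_cases h3 : ch = '|' ∧ depth = 0
        · obtain ⟨h3a, h3b⟩ := h3; subst h3a; subst h3b
          have hA : splitTopStep '|' (parts, current, (0:Int)) '|' = (parts ++ [current], [], 0) := by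
            simp [splitTopStep]
          have hB : scanStep ((0:Int), hasInk current, inkCount parts) '|' =
              (0, false, if hasInk current then inkCount parts + 1 else inkCount parts) := by
            simp [scanStep]
          rw [hA, hB]
          have := ih (parts ++ [current]) [] 0
          rw [inkCount_append_singleton, (by decide : hasInk ([] : List Char) = false)] at this
          cases hseen : hasInk current
          · simp only [hseen, if_false, Bool.false_eq_true] at this ⊢
            simpa using this
          · simp only [hseen, if_true] at this ⊢
            simpa using this
        · -- ordinary character (or '|' at depth ≠ 0): appended to current
          have hA : splitTopStep '|' (parts, current, depth) ch = (parts, current ++ [ch], depth) := by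
            simp only [splitTopStep]
            have hd : (if ch == '{' then depth + 1 else if ch == '}' then max 0 (depth - 1) else depth) = depth := by
              simp [h1, h2]
            rw [hd]
            by_cases hp : ch = '|'
            · subst hp
              have hdz : depth ≠ 0 := fun hh => h3 ⟨rfl, hh⟩
              simp [hdz]
            · simp [hp]
          have hB : scanStep (depth, hasInk current, inkCount parts) ch =
              (depth, hasInk current || !PySem.Chars.isspace ch, inkCount parts) := by
            have hp : (ch == '|' && depth == 0) = false := by
              by_cases hc : ch = '|'
              · have hdz : depth ≠ 0 := fun hh => h3 ⟨hc, hh⟩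
                simp [hc, hdz]
              · simp [hc]
            simp only [scanStep]
            rw [if_neg (by simp [h1]), if_neg (by simp [h2]), if_neg (by simp [hp])]
            cases hsp : PySem.Chars.isspace ch <;> simp
          rw [hA, hB]
          have := ih parts (current ++ [ch]) depth
          rw [hasInk_append_singleton] at this
          exact this

-- the single-pass count equals A's "count the strip-nonempty top-level parts"
theorem counts_eq (cs : List Char) :
    ((split_top_level cs '|').filter (fun part => !(PySem.Chars.strip part).isEmpty)).length =
      (if (cs.foldl scanStep (0, false, 0)).2.1 = true
        then (cs.foldl scanStep (0, false, 0)).2.2 + 1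
        else (cs.foldl scanStep (0, false, 0)).2.2) := by
  have hinv := scan_invariant cs [] [] 0
  rw [(by decide : hasInk ([] : List Char) = false),
      (by decide : inkCount ([] : List (List Char)) = 0)] at hinv
  rw [hinv]
  simp only [split_top_level]
  have hc : ((((cs.foldl (splitTopStep '|') ([], [], 0)).1 ++
      [(cs.foldl (splitTopStep '|') ([], [], 0)).2.1]).filter
        (fun part => !(PySem.Chars.strip part).isEmpty)).length) =
      inkCount ((cs.foldl (splitTopStep '|') ([], [], 0)).1 ++
        [(cs.foldl (splitTopStep '|') ([], [], 0)).2.1]) := rfl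
  rw [hc, inkCount_append_singleton]
  cases h : hasInk (cs.foldl (splitTopStep '|') ([], [], 0)).2.1 <;> simp

-- ===== VERDICT (by name: the statement is the Claim_ definition above) =====
theorem build_dress_field_spec : Claim_equal_build_dress_field := by
  intro structure_ suffix _
  unfold Spec_build_dress_field build_dress_field build_dress_field_alt
  by_cases hs : structure_.toList = []
  · simp [hs]
  · simp only [hs, ne_eq, not_false_iff, if_true, if_false, counts_eq]
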